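-- pv_equiv track=rewrite | github.com/hclivess/nado-microwallet | block_ops.py | get_hash_penalty
-- ===== SOURCE A (Python) =====
-- def get_hash_penalty(a: str, b: str):
--     assert a and b, "One of the values to hash is empty"
--
--     shorter_string = min([a, b], key=len)
--
--     score = 0
--     for letters in enumerate(shorter_string):
--         if b[letters[0]] == (letters[1]):
--             score += 1
--         score = score + a.count(letters[1])
--         score = score + b.count(letters[1])
--     return score
-- ===== SOURCE B (Python) =====
-- def get_hash_penalty(a: str, b: str):
--     assert a and b, "One of the values to hash is empty"
--
--     shorter = a if len(a) <= len(b) else b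
--
--     # one alignment pass: positional matches against b
--     matches = sum(1 for x, y in zip(shorter, b) if x == y)
--
--     # frequency table of the shorter string, then a grouped pass over distinct letters
--     freq = {}
--     for ch in shorter:
--         freq[ch] = freq.get(ch, 0) + 1
--     letters = sum(n * (a.count(ch) + b.count(ch)) for ch, n in freq.items())
--
--     return matches + letters
-- ===== Notes on version B (the rewrite author's own statement) =====
-- stated objective: faster
-- what changed: A's single per-position loop mixing the positional match test with two substring-count additions is replaced by one alignment pass over zip(shorter, b) for the matches plus a frequency table of the shorter string and a grouped sum n*(a.count(ch)+b.count(ch)) over distinct letters, so the two counts run once per distinct letter instead of once per position.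
import Mathlib
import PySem

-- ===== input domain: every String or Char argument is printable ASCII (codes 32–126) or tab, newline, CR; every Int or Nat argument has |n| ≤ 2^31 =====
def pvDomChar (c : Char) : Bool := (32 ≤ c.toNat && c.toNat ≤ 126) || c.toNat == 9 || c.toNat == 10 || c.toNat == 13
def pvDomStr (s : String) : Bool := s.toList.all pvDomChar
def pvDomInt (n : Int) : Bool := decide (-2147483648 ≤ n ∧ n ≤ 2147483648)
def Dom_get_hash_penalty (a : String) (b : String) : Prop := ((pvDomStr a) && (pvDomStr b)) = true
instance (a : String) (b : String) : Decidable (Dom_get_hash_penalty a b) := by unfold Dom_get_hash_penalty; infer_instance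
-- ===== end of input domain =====

-- B replaces A's single per-position loop (match test mixed with two count additions) by one
-- alignment pass for matches plus a frequency table of the shorter string with a grouped sum over
-- distinct letters, so counts run once per distinct letter (faster in a timing run; same value).

-- ===== PORT A =====
def get_hash_penalty (a : String) (b : String) : Int :=
  -- min([a, b], key=len): first element with minimal length, so a wins ties
  let shorter_string := if PySem.Str.len a ≤ PySem.Str.len b then a else b
  (PySem.List.enumerate shorter_string.toList).foldl
    (fun score letters =>
      let score := if PySem.Str.pyGet? b letters.1 == some letters.2 then score + 1 else score
      let score := score + (PySem.Str.count a (String.ofList [letters.2]) : Int)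
      score + (PySem.Str.count b (String.ofList [letters.2]) : Int)) 0

-- ===== PORT B =====
def get_hash_penalty_alt (a : String) (b : String) : Int :=
  let shorter := if PySem.Str.len a ≤ PySem.Str.len b then a else b
  -- matches = sum(1 for x, y in zip(shorter, b) if x == y)
  let matchCount : Int := ((shorter.toList.zip b.toList).countP (fun p => p.1 == p.2) : Int)
  -- freq[ch] = freq.get(ch, 0) + 1
  let freq : PySem.Dict Char Int :=
    shorter.toList.foldl (fun d ch => d.insert ch (d.getD ch 0 + 1)) PySem.Dict.empty
  -- letters = sum(n * (a.count(ch) + b.count(ch)) for ch, n in freq.items())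
  let letters : Int :=
    (freq.items.map (fun p =>
      p.2 * ((PySem.Str.count a (String.ofList [p.1]) : Int)
             + (PySem.Str.count b (String.ofList [p.1]) : Int)))).sum
  matchCount + letters

-- ===== PRECONDITION & SPEC =====
-- Pre_ excludes exactly the inputs on which A's assert fires (an empty string): A raises AssertionError there.
def Pre_get_hash_penalty (a : String) (b : String) : Prop := a ≠ "" ∧ b ≠ ""
instance (a : String) (b : String) : Decidable (Pre_get_hash_penalty a b) := by
  unfold Pre_get_hash_penalty; infer_instance
def pvWitness_get_hash_penalty : String × String := ("ab", "b")

def Spec_get_hash_penalty (a : String) (b : String) (out : Int) : Prop := out = get_hash_penalty_alt a b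
instance (a : String) (b : String) (out : Int) : Decidable (Spec_get_hash_penalty a b out) := by
  unfold Spec_get_hash_penalty; infer_instance

-- ===== CLAIM (what is proved, stated in full; the proofs are below) =====
def Claim_equal_get_hash_penalty : Prop := ∀ (a : String) (b : String), Dom_get_hash_penalty a b → Pre_get_hash_penalty a b → Spec_get_hash_penalty a b (get_hash_penalty a b)

-- ===== LEMMAS AND PROOFS =====

-- A's loop body splits: fold of (conditional +1, then + g x) = count part + sum part.
theorem pv_foldl_split {α : Type} (l : List α) (p : α → Bool) (g : α → Int) (init : Int) :
    l.foldl (fun score x => (if p x then score + 1 else score) + g x) init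
      = init + (l.countP p : Int) + (l.map g).sum := by
  induction l generalizing init with
  | nil => simp
  | cons x xs ih =>
    simp only [List.foldl_cons, List.countP_cons, List.map_cons, List.sum_cons, ih]
    by_cases h : p x = true <;> simp [h] <;> ring

-- the indexed-match count over enumerate equals the zip count (t long enough)
theorem pv_enum_match (s t : List Char) (k : ℕ) (h : k + s.length ≤ t.length) :
    (PySem.List.enumerate s (k : Int)).countP
        (fun p => PySem.List.pyGet? t p.1 == some p.2)
      = (s.zip (t.drop k)).countP (fun p => p.1 == p.2) := by
  induction s generalizing k with
  | nil => simp [PySem.List.enumerate_nil]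
  | cons c cs ih =>
    have hk : k < t.length := by simp at h; omega
    have hdrop : t.drop k = t[k] :: t.drop (k + 1) := List.drop_eq_getElem_cons hk
    have hcast : (k : Int) + 1 = ((k + 1 : ℕ) : Int) := by push_cast; ring
    rw [PySem.List.enumerate_cons, hdrop, List.zip_cons_cons, List.countP_cons,
        List.countP_cons, hcast, ih (k + 1) (by simp at h ⊢; omega)]
    have hget : PySem.List.pyGet? t (k : Int) = some t[k] := by
      simp [PySem.List.pyGet?_natCast, List.getElem?_eq_getElem hk]
    rcases eq_or_ne c t[k] with hc | hc
    · simp [hget, hc]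
    · simp [hget, hc, Ne.symm hc]

-- the grouped sum over distinct letters (with multiplicities) equals the per-letter sum
theorem pv_group_sum (s : List Char) (f : Char → Int) :
    ((PySem.Set.ofList s).map (fun c => (s.count c : Int) * f c)).sum = (s.map f).sum := by
  have hnd : (PySem.Set.ofList s).Nodup := PySem.Set.nodup_ofList s
  have hfin : (PySem.Set.ofList s).toFinset = s.toFinset := by
    ext c; simp [PySem.Set.mem_ofList]
  calc ((PySem.Set.ofList s).map (fun c => (s.count c : Int) * f c)).sum
      = ∑ c ∈ (PySem.Set.ofList s).toFinset, (s.count c : Int) * f c :=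
        (List.sum_toFinset _ hnd).symm
    _ = ∑ c ∈ (s : Multiset Char).toFinset, (s : Multiset Char).count c • f c := by
        rw [hfin]; simp
    _ = ((s : Multiset Char).map f).sum := (Finset.sum_multiset_map_count _ _).symm
    _ = (s.map f).sum := by simp

-- ===== VERDICT (by name: the statement is the Claim_ definition above) =====
theorem get_hash_penalty_spec : Claim_equal_get_hash_penalty := by
  intro a b _ _
  unfold Spec_get_hash_penalty get_hash_penalty get_hash_penalty_alt
  dsimp only
  set shorter := if PySem.Str.len a ≤ PySem.Str.len b then a else b with hsh
  set s := shorter.toList with hs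
  set f : Char → Int := fun c =>
    (PySem.Str.count a (String.ofList [c]) : Int) + (PySem.Str.count b (String.ofList [c]) : Int)
    with hf
  have hlenx : ∀ t : String, PySem.Str.len t = (t.toList.length : Int) := by
    intro t; simp [PySem.Str.len]
  have hlen : 0 + s.length ≤ b.toList.length := by
    rw [hs, hsh]; split <;> rename_i hc <;> simp only [hlenx] at hc ⊢ <;> omega
  have hstep : (fun (score : Int) (letters : Int × Char) =>
      (if PySem.Str.pyGet? b letters.1 == some letters.2 then score + 1 else score) +
        (PySem.Str.count a (String.ofList [letters.2]) : Int) +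
        (PySem.Str.count b (String.ofList [letters.2]) : Int))
      = (fun (score : Int) (x : Int × Char) =>
          (if PySem.Str.pyGet? b x.1 == some x.2 then score + 1 else score) + f x.2) := by
    funext score x; rw [hf]; ring
  rw [hstep, pv_foldl_split, zero_add]
  congr 1
  · -- matches part
    have h0 := pv_enum_match s b.toList 0 hlen
    simp only [Nat.cast_zero, List.drop_zero] at h0
    simp only [PySem.Str.pyGet?_eq, PySem.Chars.pyGet?_eq_listPyGet?]
    exact_mod_cast h0
  · -- letters part
    have hsnd : (PySem.List.enumerate s).map (fun p => f p.2) = s.map f := by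
      rw [show (fun (p : Int × Char) => f p.2) = f ∘ Prod.snd from rfl,
          ← List.map_map, PySem.List.map_snd_enumerate]
    rw [hsnd, ← pv_group_sum s f,
        PySem.Dict.foldl_insert_getD_add_one_eq_counter, PySem.Dict.items_counter,
        List.map_map]
    rfl
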